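-- pv_equiv track=rewrite | github.com/Pyrojune1989/MLDL | QMLDL.py | move_sequence
-- ===== SOURCE A (Python) =====
-- hebrew_letters = [
--     "Aleph", "Bet", "Gimel", "Dalet", "Hei", "Vav", "Zayin", "Heth", "Tet",
--     "Yud", "Kaph", "Lamed", "Mem", "Nun", "Samech", "Ayin", "Pei", "Tzaddi",
--     "Qoph", "Resh", "Shin", "Tav"
-- ]
--
-- symbols = ["X", "2", "1", "T", "7", "1", "т", "n", "U", "*", "J", "7", "n", "J",
--            "0", "V", "5", "Y", "7", "7", "u", "7"]
--
-- def triangular_number(n):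
--     return n * (n + 1) // 2  # Formula for nth triangular number
--
-- def generate_sequence(n_terms=29):
--     sequence = []
--     for i in range(n_terms):
--         letter_index = i % len(hebrew_letters)  # Cycle through letters
--         letter = hebrew_letters[letter_index]
--         symbol = symbols[letter_index]
--         increment = triangular_number(i + 1)  # Compute pattern
--         result = i + 1  # Expected result
--         sequence.append((letter, symbol, increment, result))
--     return sequence
--
-- def move_sequence(start_x, start_y):
--     movements = [(1, 0), (0, 1), (-1, 0), (0, -1)]
--     path = [(start_x, start_y)]
--     sequence = generate_sequence(len(movements))
--
--     for i, (dx, dy) in enumerate(movements):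
--         increment = sequence[i][2]
--         new_x = path[-1][0] + dx * increment
--         new_y = path[-1][1] + dy * increment
--         path.append((new_x, new_y))
--     return path
-- ===== SOURCE B (Python) =====
-- def move_sequence(start_x, start_y):
--     # Closed form: cumulative sums of the four fixed direction steps scaled by
--     # triangular numbers 1, 3, 6, 10.
--     return [
--         (start_x, start_y),
--         (start_x + 1, start_y),
--         (start_x + 1, start_y + 3),
--         (start_x - 5, start_y + 3),
--         (start_x - 5, start_y - 7),
--     ]
-- ===== Notes on version B (the rewrite author's own statement) =====
-- stated objective: simpler
-- what changed: B replaces the generate_sequence/triangular_number machinery and the movement loop with a direct closed-form list of the five points, since the directions and scales are fixed constants.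
import Mathlib
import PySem

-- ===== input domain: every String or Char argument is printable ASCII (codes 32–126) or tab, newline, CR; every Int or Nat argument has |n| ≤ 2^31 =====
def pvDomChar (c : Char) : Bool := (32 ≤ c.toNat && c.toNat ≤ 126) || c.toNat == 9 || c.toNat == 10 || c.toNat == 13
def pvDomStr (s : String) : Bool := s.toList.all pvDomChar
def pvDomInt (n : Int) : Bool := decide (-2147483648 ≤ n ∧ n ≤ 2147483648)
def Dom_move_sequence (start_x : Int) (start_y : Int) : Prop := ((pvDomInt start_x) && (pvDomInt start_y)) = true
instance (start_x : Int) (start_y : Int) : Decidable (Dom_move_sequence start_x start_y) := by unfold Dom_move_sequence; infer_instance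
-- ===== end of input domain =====

-- B replaces A's sequence-generation machinery and movement loop with a closed-form
-- list of the five points (simpler; same result).


-- ===== PORT A =====
def hebrew_letters : List String :=
  ["Aleph", "Bet", "Gimel", "Dalet", "Hei", "Vav", "Zayin", "Heth", "Tet",
   "Yud", "Kaph", "Lamed", "Mem", "Nun", "Samech", "Ayin", "Pei", "Tzaddi",
   "Qoph", "Resh", "Shin", "Tav"]

def symbols : List String :=
  ["X", "2", "1", "T", "7", "1", "т", "n", "U", "*", "J", "7", "n", "J",
   "0", "V", "5", "Y", "7", "7", "u", "7"]

def triangular_number (n : Int) : Int := PySem.Int.floordiv (n * (n + 1)) 2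

-- list indexing is always in range here (index = i % len); .getD supplies an unreachable default
def generate_sequence (n_terms : Int) : List (String × String × Int × Int) :=
  (PySem.List.pyRange 0 n_terms 1).foldl (fun sequence i =>
    let letter_index := PySem.Int.mod i (hebrew_letters.length : Int)
    let letter := (PySem.List.pyGet? hebrew_letters letter_index).getD ""
    let symbol := (PySem.List.pyGet? symbols letter_index).getD ""
    let increment := triangular_number (i + 1)
    let result := i + 1
    sequence ++ [(letter, symbol, increment, result)]) []

def move_sequence (start_x : Int) (start_y : Int) : List (Int × Int) :=
  let movements : List (Int × Int) := [(1, 0), (0, 1), (-1, 0), (0, -1)]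
  let sequence := generate_sequence (movements.length : Int)
  (PySem.List.enumerate movements).foldl (fun path p =>
    let increment := ((PySem.List.pyGet? sequence (p.1 : Int)).map (fun t => t.2.2.1)).getD 0
    let last := (PySem.List.pyGet? path (-1)).getD (0, 0)
    path ++ [(last.1 + p.2.1 * increment, last.2 + p.2.2 * increment)])
    [(start_x, start_y)]

-- ===== PORT B =====
def move_sequence_alt (start_x : Int) (start_y : Int) : List (Int × Int) :=
  [(start_x, start_y),
   (start_x + 1, start_y),
   (start_x + 1, start_y + 3),
   (start_x - 5, start_y + 3),
   (start_x - 5, start_y - 7)]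

-- ===== PRECONDITION & SPEC =====
def Spec_move_sequence (start_x : Int) (start_y : Int) (out : List (Int × Int)) : Prop := out = move_sequence_alt start_x start_y
instance (start_x : Int) (start_y : Int) (out : List (Int × Int)) : Decidable (Spec_move_sequence start_x start_y out) := by unfold Spec_move_sequence; infer_instance

-- ===== CLAIM (what is proved, stated in full; the proofs are below) =====
def Claim_equal_move_sequence : Prop := ∀ (start_x : Int) (start_y : Int), Dom_move_sequence start_x start_y → Spec_move_sequence start_x start_y (move_sequence start_x start_y)

-- ===== LEMMAS AND PROOFS =====

-- ===== VERDICT (by name: the statement is the Claim_ definition above) =====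
lemma generate_sequence_four :
    generate_sequence (([((1:Int),(0:Int)), (0,1), (-1,0), (0,-1)].length : Nat) : Int) =
      [("Aleph", "X", 1, 1), ("Bet", "2", 3, 2), ("Gimel", "1", 6, 3), ("Dalet", "T", 10, 4)] := by
  decide

theorem move_sequence_spec : Claim_equal_move_sequence := by
  intro x y _
  unfold Spec_move_sequence
  simp only [move_sequence, move_sequence_alt, generate_sequence_four]
  simp [PySem.List.enumerate, PySem.List.pyGet?, PySem.List.pyIdx?, List.foldl]
  omega
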